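-- pv_equiv track=rewrite | github.com/IronLanguages/main | Languages/Ruby/Tests/legacy2/Compat/gen_assignment_long.py | right_generator
-- ===== SOURCE A (Python) =====
-- def right_generator(depth):
--     if depth > 5: return
--
--     for x in ["[]", "*[]", "B"]:
--         yield x
--
--     for x in right_generator(depth+1):
--         yield "B, %s" % x
--
--     for x in right_generator(depth+1):
--         yield "[%s]" % x
--
--     for x in right_generator(depth+1):
--         yield "*[%s]" % x
-- ===== SOURCE B (Python) =====
-- def right_generator(depth):
--     # Bottom-up iterative construction of the same sequence (same order, same values).
--     if depth > 5:
--         return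
--     cur = []
--     d = 5
--     while d >= depth:
--         cur = (["[]", "*[]", "B"]
--                + ["B, %s" % x for x in cur]
--                + ["[%s]" % x for x in cur]
--                + ["*[%s]" % x for x in cur])
--         d -= 1
--     yield from cur
-- ===== Notes on version B (the rewrite author's own statement) =====
-- stated objective: alternative
-- what changed: Top-down four-way recursion replaced by a bottom-up iterative loop that builds the single level list from depth 5 down to the requested depth, sharing one list per level instead of recomputing the same sub-generator three times.
import Mathlib
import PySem

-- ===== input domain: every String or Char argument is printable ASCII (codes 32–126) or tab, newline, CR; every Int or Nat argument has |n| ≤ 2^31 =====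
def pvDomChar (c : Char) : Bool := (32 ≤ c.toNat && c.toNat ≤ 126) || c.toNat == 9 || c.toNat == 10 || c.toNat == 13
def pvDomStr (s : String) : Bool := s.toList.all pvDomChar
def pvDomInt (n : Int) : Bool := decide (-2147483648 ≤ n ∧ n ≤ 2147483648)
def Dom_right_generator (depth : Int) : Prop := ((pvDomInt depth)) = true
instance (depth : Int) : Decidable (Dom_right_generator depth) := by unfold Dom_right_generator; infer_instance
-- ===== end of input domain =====

-- B replaces A's top-down four-way recursion by a bottom-up loop building one level list per depth (alternative decomposition, same output order).


-- ===== PORT A =====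
-- literal transliteration of A: guard depth > 5, then the three base yields followed by
-- three passes over right_generator (depth+1), each pass re-running the recursion.
def right_generator (depth : Int) : List String :=
  if depth > 5 then []
  else
    ["[]", "*[]", "B"]
      ++ (right_generator (depth + 1)).map (fun x => "B, " ++ x)
      ++ (right_generator (depth + 1)).map (fun x => "[" ++ x ++ "]")
      ++ (right_generator (depth + 1)).map (fun x => "*[" ++ x ++ "]")
termination_by (6 - depth).toNat
decreasing_by all_goals omega

-- ===== PORT B =====
-- one level of the bottom-up construction (the body of Source B's while loop)
def rgStep (cur : List String) : List String :=
  ["[]", "*[]", "B"]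
    ++ cur.map (fun x => "B, " ++ x)
    ++ cur.map (fun x => "[" ++ x ++ "]")
    ++ cur.map (fun x => "*[" ++ x ++ "]")

-- Source B's while loop: while d >= depth: cur = rgStep cur; d -= 1
def rgLoop (d depth : Int) (cur : List String) : List String :=
  if d ≥ depth then rgLoop (d - 1) depth (rgStep cur) else cur
termination_by (d - depth + 1).toNat
decreasing_by omega

def right_generator_alt (depth : Int) : List String :=
  if depth > 5 then [] else rgLoop 5 depth []

-- ===== PRECONDITION & SPEC =====
def Spec_right_generator (depth : Int) (out : List String) : Prop := out = right_generator_alt depth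
instance (depth : Int) (out : List String) : Decidable (Spec_right_generator depth out) := by unfold Spec_right_generator; infer_instance

-- ===== CLAIM (what is proved, stated in full; the proofs are below) =====
def Claim_equal_right_generator : Prop := ∀ (depth : Int), Dom_right_generator depth → Spec_right_generator depth (right_generator depth)

-- ===== LEMMAS AND PROOFS =====

-- one bottom-up step reproduces one unfolding of A's recursion
theorem rgStep_eq (d : Int) (hd : ¬ d > 5) :
    rgStep (right_generator (d + 1)) = right_generator d := by
  conv_rhs => rw [right_generator, if_neg hd]
  rfl

-- loop invariant: running the loop from level d with cur = A's level-(d+1) list yields A's level-depth list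
theorem rgLoop_inv (n : Nat) :
    ∀ d depth : Int, d ≤ 5 → depth ≤ d → (d - depth).toNat = n →
      rgLoop d depth (right_generator (d + 1)) = right_generator depth := by
  induction n with
  | zero =>
    intro d depth hd hle hn
    have hdd : d = depth := by omega
    subst hdd
    rw [rgLoop, if_pos le_rfl, rgStep_eq d (by omega), rgLoop, if_neg (by omega)]
  | succ n ih =>
    intro d depth hd hle hn
    rw [rgLoop, if_pos hle, rgStep_eq d (by omega)]
    have : (d - 1) - depth + 1 = d - depth := by ring
    have h := ih (d - 1) depth (by omega) (by omega) (by omega)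
    rw [show d - 1 + 1 = d by ring] at h
    exact h

-- ===== VERDICT (by name: the statement is the Claim_ definition above) =====
theorem right_generator_spec : Claim_equal_right_generator := by
  intro depth _
  unfold Spec_right_generator right_generator_alt
  by_cases h : depth > 5
  · rw [if_pos h, right_generator, if_pos h]
  · rw [if_neg h]
    have h6 : right_generator 6 = [] := by rw [right_generator]; simp
    have := rgLoop_inv (5 - depth).toNat 5 depth le_rfl (by omega) rfl
    rw [show (5 : Int) + 1 = 6 by ring, h6] at this
    exact (this).symm
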